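-- pv_equiv track=rewrite | github.com/bensonli1219/c242_cafa5 | src/cafa_multimodal_cache_builders.py | chunk_sequence_windows
-- ===== SOURCE A (Python) =====
-- DEFAULT_MAX_RESIDUES_PER_CHUNK = 1000
--
-- DEFAULT_CHUNK_OVERLAP = 128
--
-- def chunk_sequence_windows(
--     sequence_length: int,
--     max_residues_per_chunk: int = DEFAULT_MAX_RESIDUES_PER_CHUNK,
--     chunk_overlap: int = DEFAULT_CHUNK_OVERLAP,
-- ) -> list[tuple[int, int]]:
--     if sequence_length <= 0:
--         return []
--     if max_residues_per_chunk <= 0: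
--         raise ValueError("max_residues_per_chunk must be positive")
--     if chunk_overlap < 0:
--         raise ValueError("chunk_overlap must be non-negative")
--     if chunk_overlap >= max_residues_per_chunk:
--         raise ValueError("chunk_overlap must be smaller than max_residues_per_chunk")
--
--     windows: list[tuple[int, int]] = []
--     start = 0
--     while start < sequence_length:
--         end = min(start + max_residues_per_chunk, sequence_length)
--         windows.append((start, end))
--         if end >= sequence_length:
--             break
--         start = end - chunk_overlap
--     return windows
-- ===== SOURCE B (Python) =====
-- def chunk_sequence_windows(
--     sequence_length: int,
--     max_residues_per_chunk: int = 1000,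
--     chunk_overlap: int = 128,
-- ) -> list[tuple[int, int]]:
--     if sequence_length <= 0:
--         return []
--     if max_residues_per_chunk <= 0:
--         raise ValueError("max_residues_per_chunk must be positive")
--     if chunk_overlap < 0:
--         raise ValueError("chunk_overlap must be non-negative")
--     if chunk_overlap >= max_residues_per_chunk:
--         raise ValueError("chunk_overlap must be smaller than max_residues_per_chunk")
--     step = max_residues_per_chunk - chunk_overlap
--     n = max(0, sequence_length - max_residues_per_chunk + step - 1) // step + 1
--     return [
--         (i * step, min(i * step + max_residues_per_chunk, sequence_length))
--         for i in range(n)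
--     ]
-- ===== Notes on version B (the rewrite author's own statement) =====
-- stated objective: alternative
-- what changed: Replaces A's mutable-start while loop (step, append, break) by a closed-form window count n = max(0, L - max + step - 1)//step + 1 and a direct comprehension over window indices; same guard clauses.
import Mathlib
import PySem

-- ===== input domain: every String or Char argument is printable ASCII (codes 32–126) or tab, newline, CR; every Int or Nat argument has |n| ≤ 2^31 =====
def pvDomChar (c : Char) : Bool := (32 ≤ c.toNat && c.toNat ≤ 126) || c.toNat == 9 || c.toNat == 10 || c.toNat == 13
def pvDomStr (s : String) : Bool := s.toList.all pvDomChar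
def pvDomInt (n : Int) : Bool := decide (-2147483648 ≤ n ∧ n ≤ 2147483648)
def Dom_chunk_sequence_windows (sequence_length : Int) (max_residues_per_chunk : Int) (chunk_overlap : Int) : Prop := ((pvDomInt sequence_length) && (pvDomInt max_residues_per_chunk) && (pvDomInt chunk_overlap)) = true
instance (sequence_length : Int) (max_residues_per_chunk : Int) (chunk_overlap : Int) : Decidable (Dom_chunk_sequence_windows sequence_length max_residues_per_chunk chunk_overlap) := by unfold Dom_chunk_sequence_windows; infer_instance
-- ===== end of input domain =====

-- B replaces A's mutable-`start` while loop by a closed-form window count and a direct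
-- comprehension over the window indices (alternative decomposition, same O(result) cost).

-- ===== PORT A =====
-- the `while start < sequence_length` loop of A; the hypothesis `h` (established by A's
-- guard clauses before the loop is reached) is only used for termination
def cswLoop (L mx ov : Int) (h : ov < mx) (start : Int) : List (Int × Int) :=
  if _hs : start < L then
    let e := min (start + mx) L
    if e ≥ L then [(start, e)]                 -- append then `break`
    else (start, e) :: cswLoop L mx ov h (e - ov)
  else []
termination_by (L - start).toNat
decreasing_by
  simp only [ge_iff_le, not_le] at *
  have : min (start + mx) L = start + mx := by omega
  omega

def chunk_sequence_windows (sequence_length : Int) (max_residues_per_chunk : Int) (chunk_overlap : Int) : List (Int × Int) :=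
  if sequence_length ≤ 0 then []
  else if max_residues_per_chunk ≤ 0 then []        -- Python: raise ValueError (outside Pre_)
  else if chunk_overlap < 0 then []                 -- Python: raise ValueError (outside Pre_)
  else if h : chunk_overlap ≥ max_residues_per_chunk then []  -- Python: raise ValueError (outside Pre_)
  else cswLoop sequence_length max_residues_per_chunk chunk_overlap (by omega) 0

-- ===== PORT B =====
def chunk_sequence_windows_alt (sequence_length : Int) (max_residues_per_chunk : Int) (chunk_overlap : Int) : List (Int × Int) :=
  if sequence_length ≤ 0 then []
  else if max_residues_per_chunk ≤ 0 then []        -- Python: raise ValueError (outside Pre_)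
  else if chunk_overlap < 0 then []                 -- Python: raise ValueError (outside Pre_)
  else if chunk_overlap ≥ max_residues_per_chunk then []  -- Python: raise ValueError (outside Pre_)
  else
    -- step = max_residues_per_chunk - chunk_overlap; n = max(0, L - max + step - 1)//step + 1
    (PySem.List.pyRange 0
        (PySem.Int.floordiv
          (max 0 (sequence_length - max_residues_per_chunk + (max_residues_per_chunk - chunk_overlap) - 1))
          (max_residues_per_chunk - chunk_overlap) + 1) 1).map
      (fun i => (i * (max_residues_per_chunk - chunk_overlap),
                 min (i * (max_residues_per_chunk - chunk_overlap) + max_residues_per_chunk) sequence_length))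

-- ===== PRECONDITION & SPEC =====
-- Pre_ excludes exactly the inputs where A raises ValueError: positive length with a
-- non-positive chunk size, a negative overlap, or an overlap ≥ the chunk size.
def Pre_chunk_sequence_windows (sequence_length : Int) (max_residues_per_chunk : Int) (chunk_overlap : Int) : Prop :=
  sequence_length ≤ 0 ∨ (0 < max_residues_per_chunk ∧ 0 ≤ chunk_overlap ∧ chunk_overlap < max_residues_per_chunk)
instance (sequence_length : Int) (max_residues_per_chunk : Int) (chunk_overlap : Int) : Decidable (Pre_chunk_sequence_windows sequence_length max_residues_per_chunk chunk_overlap) := by unfold Pre_chunk_sequence_windows; infer_instance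

def pvWitness_chunk_sequence_windows : Int × Int × Int := (25, 10, 3)

def Spec_chunk_sequence_windows (sequence_length : Int) (max_residues_per_chunk : Int) (chunk_overlap : Int) (out : List (Int × Int)) : Prop := out = chunk_sequence_windows_alt sequence_length max_residues_per_chunk chunk_overlap
instance (sequence_length : Int) (max_residues_per_chunk : Int) (chunk_overlap : Int) (out : List (Int × Int)) : Decidable (Spec_chunk_sequence_windows sequence_length max_residues_per_chunk chunk_overlap out) := by unfold Spec_chunk_sequence_windows; infer_instance

-- ===== CLAIM (what is proved, stated in full; the proofs are below) =====
def Claim_equal_chunk_sequence_windows : Prop := ∀ (sequence_length : Int) (max_residues_per_chunk : Int) (chunk_overlap : Int), Dom_chunk_sequence_windows sequence_length max_residues_per_chunk chunk_overlap → Pre_chunk_sequence_windows sequence_length max_residues_per_chunk chunk_overlap → Spec_chunk_sequence_windows sequence_length max_residues_per_chunk chunk_overlap (chunk_sequence_windows sequence_length max_residues_per_chunk chunk_overlap)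

-- ===== LEMMAS AND PROOFS =====

-- main loop invariant: started at `i*step` with `i ≤ q`, the loop emits exactly the
-- windows of indices i, i+1, …, q (q = index of the last window)
theorem cswLoop_eq (L mx ov : Int) (h : ov < mx)
    (q : Int)
    (hq0 : 0 ≤ q)
    (hqL : q * (mx - ov) < L)
    (hq1 : L ≤ q * (mx - ov) + mx)
    (hq2 : ∀ j : Int, 0 ≤ j → j < q → j * (mx - ov) + mx < L) :
    ∀ (k : Nat) (i : Int), (L - i * (mx - ov)).toNat ≤ k → 0 ≤ i → i ≤ q →
      cswLoop L mx ov h (i * (mx - ov)) =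
        (PySem.List.pyRange i (q + 1) 1).map
          (fun j => (j * (mx - ov), min (j * (mx - ov) + mx) L)) := by
  intro k
  induction k with
  | zero =>
    intro i hk hi0 hiq
    exfalso
    have hmono : i * (mx - ov) ≤ q * (mx - ov) :=
      mul_le_mul_of_nonneg_right hiq (by omega)
    omega
  | succ k ih =>
    intro i hk hi0 hiq
    have hmono : i * (mx - ov) ≤ q * (mx - ov) :=
      mul_le_mul_of_nonneg_right hiq (by omega)
    have hlt : i * (mx - ov) < L := by omega
    rw [cswLoop]
    simp only [dif_pos hlt]
    by_cases hend : min (i * (mx - ov) + mx) L ≥ L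
    · -- last window: i must equal q
      have hiq' : i = q := by
        rcases lt_or_eq_of_le hiq with hlt' | he
        · exact absurd (hq2 i hi0 hlt') (by omega)
        · exact he
      subst hiq'
      rw [if_pos hend, PySem.List.pyRange_one_singleton]
      simp only [List.map_cons, List.map_nil]
    · have hmin : min (i * (mx - ov) + mx) L = i * (mx - ov) + mx := by omega
      rw [if_neg hend]
      have hnext : min (i * (mx - ov) + mx) L - ov = (i + 1) * (mx - ov) := by
        rw [hmin]; ring
      -- i < q here: otherwise this would be the last window already
      have hiq2 : i < q := by
        rcases lt_or_eq_of_le hiq with hlt' | he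
        · exact hlt'
        · exfalso; subst he; omega
      have hexp : (i + 1) * (mx - ov) = i * (mx - ov) + (mx - ov) := by ring
      have hk' : (L - (i + 1) * (mx - ov)).toNat ≤ k := by omega
      rw [hnext, PySem.List.pyRange_one_cons (show i < q + 1 by omega)]
      simp only [List.map_cons]
      rw [ih (i + 1) hk' (by omega) (by omega)]

-- ===== VERDICT (by name: the statement is the Claim_ definition above) =====
theorem chunk_sequence_windows_spec : Claim_equal_chunk_sequence_windows := by
  intro L mx ov _ hpre
  unfold Spec_chunk_sequence_windows
  by_cases hL : L ≤ 0
  · simp [chunk_sequence_windows, chunk_sequence_windows_alt, hL]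
  · have hg : 0 < mx ∧ 0 ≤ ov ∧ ov < mx := by
      rcases hpre with h | h
      · omega
      · exact h
    obtain ⟨hmx, hov, hovmx⟩ := hg
    have hstep : (0:Int) < mx - ov := by omega
    have hfd : PySem.Int.floordiv (max 0 (L - mx + (mx - ov) - 1)) (mx - ov)
        = (max 0 (L - mx + (mx - ov) - 1)) / (mx - ov) :=
      PySem.Int.floordiv_eq_ediv_of_pos hstep
    set A := max 0 (L - mx + (mx - ov) - 1) with hA
    set q := A / (mx - ov) with hqdef
    have hAeq : chunk_sequence_windows L mx ov = cswLoop L mx ov (by omega) 0 := by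
      unfold chunk_sequence_windows
      rw [if_neg hL, if_neg (by omega), if_neg (by omega), dif_neg (by omega)]
    have hBeq : chunk_sequence_windows_alt L mx ov =
        (PySem.List.pyRange 0 (q + 1) 1).map
          (fun j => (j * (mx - ov), min (j * (mx - ov) + mx) L)) := by
      unfold chunk_sequence_windows_alt
      rw [if_neg hL, if_neg (by omega), if_neg (by omega), if_neg (by omega)]
      rw [hfd]
    rw [hAeq, hBeq]
    -- quotient/remainder facts about q
    have hdm := Int.mul_ediv_add_emod A (mx - ov)
    have hr0 : 0 ≤ A % (mx - ov) := Int.emod_nonneg A (by omega)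
    have hr1 : A % (mx - ov) < mx - ov := Int.emod_lt_of_pos A hstep
    have hq0 : 0 ≤ q := Int.ediv_nonneg (by omega) (by omega)
    have hco : (mx - ov) * q = q * (mx - ov) := mul_comm _ _
    rw [← hqdef] at hdm
    -- resolve the max, then the three characterising facts about q
    by_cases hB : L - mx + (mx - ov) - 1 ≤ 0
    · have hA0 : A = 0 := by rw [hA]; omega
      have hqz : q = 0 := by
        have h1 : 0 ≤ q * (mx - ov) := mul_nonneg hq0 (by omega)
        have h2 : q * (mx - ov) = 0 := by omega
        rcases mul_eq_zero.mp h2 with h | h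
        · exact h
        · omega
      have hqL : q * (mx - ov) < L := by rw [hqz]; simpa using (by omega : (0:Int) < L)
      have hq1 : L ≤ q * (mx - ov) + mx := by rw [hqz]; simp; omega
      have hq2 : ∀ j : Int, 0 ≤ j → j < q → j * (mx - ov) + mx < L := by
        intro j hj0 hjq; rw [hqz] at hjq; omega
      have := cswLoop_eq L mx ov (by omega) q hq0 hqL hq1 hq2
        L.toNat 0 (by omega) le_rfl hq0
      simpa using this
    · have hAB : A = L - mx + (mx - ov) - 1 := by rw [hA]; omega
      have hqL : q * (mx - ov) < L := by omega
      have hq1 : L ≤ q * (mx - ov) + mx := by omega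
      have hq2 : ∀ j : Int, 0 ≤ j → j < q → j * (mx - ov) + mx < L := by
        intro j hj0 hjq
        have hmono : j * (mx - ov) ≤ (q - 1) * (mx - ov) :=
          mul_le_mul_of_nonneg_right (by omega) (by omega)
        have hexp : (q - 1) * (mx - ov) = q * (mx - ov) - (mx - ov) := by ring
        omega
      have := cswLoop_eq L mx ov (by omega) q hq0 hqL hq1 hq2
        L.toNat 0 (by omega) le_rfl hq0
      simpa using this
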